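-- pv_equiv track=rewrite | github.com/posl/comment_recommendation | script/split_gen/3_time/zh/141_B/7.py | check
-- ===== SOURCE A (Python) =====
-- def check(s):
--     if len(s) == 1:
--         if s[0] == 'L' or s[0] == 'U' or s[0] == 'D':
--             return True
--         else:
--             return False
--     else:
--         if s[0] == 'R' or s[0] == 'U' or s[0] == 'D':
--             return check(s[1:])
--         else:
--             return False
-- ===== SOURCE B (Python) =====
-- def check(s):
--     return all(c in 'RUD' for c in s[:-1]) and s[-1] in 'LUD'
-- ===== Notes on version B (the rewrite author's own statement) =====
-- stated objective: simpler
-- what changed: Replaces the slice-based recursion (O(n^2) copying) with a single non-recursive expression: all chars before the last are tested against 'RUD' and the last char against 'LUD'.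
import Mathlib
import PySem

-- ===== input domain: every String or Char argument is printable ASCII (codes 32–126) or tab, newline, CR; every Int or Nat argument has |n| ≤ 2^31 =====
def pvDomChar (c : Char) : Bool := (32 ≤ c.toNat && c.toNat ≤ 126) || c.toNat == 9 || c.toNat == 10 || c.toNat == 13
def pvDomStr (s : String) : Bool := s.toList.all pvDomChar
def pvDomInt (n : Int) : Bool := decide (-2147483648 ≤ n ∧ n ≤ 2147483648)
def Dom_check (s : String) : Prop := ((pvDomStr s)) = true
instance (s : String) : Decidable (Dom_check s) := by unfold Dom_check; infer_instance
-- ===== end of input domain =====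

-- B is a single pass instead of A's slice-based recursion: validate s[:-1] against 'RUD' and s[-1] against 'LUD'; both raise on the empty string (excluded by Pre_check).

-- ===== PORT A =====
def checkGo : List Char → Bool
  | [] => false  -- unreachable under Pre_check (Python raises IndexError on '')
  | [c] => c == 'L' || c == 'U' || c == 'D'
  | c :: rest => if c == 'R' || c == 'U' || c == 'D' then checkGo rest else false

def check (s : String) : Bool := checkGo s.toList

-- ===== PORT B =====
def check_alt (s : String) : Bool :=
  (PySem.List.slice s.toList none (some (-1))).all (fun c => c == 'R' || c == 'U' || c == 'D') &&
  (match PySem.List.pyGet? s.toList (-1) with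
   | some c => c == 'L' || c == 'U' || c == 'D'
   | none => false)

-- ===== PRECONDITION & SPEC =====
-- Pre_check excludes only the empty string, on which Python A raises IndexError (s[0]).
def Pre_check (s : String) : Prop := s.toList ≠ []
instance (s : String) : Decidable (Pre_check s) := by unfold Pre_check; infer_instance
def pvWitness_check : String := "RUL"

def Spec_check (s : String) (out : Bool) : Prop := out = check_alt s
instance (s : String) (out : Bool) : Decidable (Spec_check s out) := by unfold Spec_check; infer_instance

-- ===== CLAIM (what is proved, stated in full; the proofs are below) =====
def Claim_equal_check : Prop := ∀ (s : String), Dom_check s → Pre_check s → Spec_check s (check s)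

-- ===== LEMMAS AND PROOFS =====
theorem checkGo_eq (l : List Char) (h : l ≠ []) :
    checkGo l = (l.dropLast.all (fun c => c == 'R' || c == 'U' || c == 'D') &&
      (match l.getLast? with
       | some c => c == 'L' || c == 'U' || c == 'D'
       | none => false)) := by
  induction l with
  | nil => exact absurd rfl h
  | cons c rest ih =>
    cases rest with
    | nil => simp [checkGo]
    | cons d tl =>
      rw [show checkGo (c :: d :: tl) =
          (if c == 'R' || c == 'U' || c == 'D' then checkGo (d :: tl) else false) from rfl]
      rw [ih (by simp)]
      by_cases hc : (c == 'R' || c == 'U' || c == 'D') = true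
      · simp [hc, List.getLast?_cons_cons]
      · simp [hc]

-- ===== VERDICT (by name: the statement is the Claim_ definition above) =====
theorem check_spec : Claim_equal_check := by
  intro s _ hpre
  unfold Spec_check check check_alt
  rw [PySem.List.slice_to_neg_one, PySem.List.pyGet?_neg_one]
  exact checkGo_eq s.toList hpre
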